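-- pv_equiv track=rewrite | github.com/hi-hj/algorithm-study | LeeBros/backtracking/beautiful-number.py | check_beautiful
-- ===== SOURCE A (Python) =====
-- def check_beautiful(number):
--     n_cnt = 1
--     n_check = []
--     for i in range(len(number)):
--         if i==len(number)-1 or number[i] == n_cnt or number[i]!=number[i+1]:
--             n_check.append((number[i], n_cnt))
--             n_cnt = 1
--         elif number[i] == number[i+1]:
--             n_cnt +=1
--
--     for num, cnt in n_check:
--         if num !=cnt:
--             return False
--     return True
-- ===== SOURCE B (Python) =====
-- def check_beautiful(number):
--     # Single run-length pass: each maximal run of digit d (length c) is valid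
--     # iff d > 0 and d divides c.
--     if not number:
--         return True
--     d = number[0]
--     c = 1
--     for x in number[1:]:
--         if x == d:
--             c += 1
--         else:
--             if d <= 0 or c % d != 0:
--                 return False
--             d, c = x, 1
--     return d > 0 and c % d == 0
-- ===== Notes on version B (the rewrite author's own statement) =====
-- stated objective: simpler
-- what changed: Replaces A's forced chunk-splitting counter, emitted (digit,count) pair list and second checking pass by one run-length pass that validates each maximal run with a single divisibility test (digit > 0 and run length % digit == 0).
import Mathlib
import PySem

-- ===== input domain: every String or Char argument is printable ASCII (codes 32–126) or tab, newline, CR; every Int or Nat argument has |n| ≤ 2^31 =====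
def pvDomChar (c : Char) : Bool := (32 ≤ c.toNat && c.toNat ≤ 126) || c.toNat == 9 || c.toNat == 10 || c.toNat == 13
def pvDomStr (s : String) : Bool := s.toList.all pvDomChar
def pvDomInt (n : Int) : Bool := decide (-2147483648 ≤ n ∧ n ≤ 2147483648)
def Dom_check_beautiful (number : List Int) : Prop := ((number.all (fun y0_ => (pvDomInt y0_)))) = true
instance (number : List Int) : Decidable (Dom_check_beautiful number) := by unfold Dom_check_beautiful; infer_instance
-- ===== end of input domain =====

-- B replaces A's chunk-splitting counter + emitted pair list by one run-length pass with a
-- divisibility test per maximal run (objective: simpler; same O(n) cost).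

-- ===== PORT A =====
-- A's index loop with lookahead number[i+1] becomes the obvious structural recursion with the
-- same state n_cnt; the branch order ('i==len(number)-1 or number[i]==n_cnt or
-- number[i]!=number[i+1]', elif equal-to-next increment) is kept; the emitted n_check list is
-- built in the same left-to-right order.
def aChunks (n_cnt : Int) : List Int → List (Int × Int)
  | [] => []
  | [x] => [(x, n_cnt)]                       -- i == len(number)-1
  | x :: y :: rest =>
    if x == n_cnt || x != y then (x, n_cnt) :: aChunks 1 (y :: rest)
    else aChunks (n_cnt + 1) (y :: rest)      -- elif number[i] == number[i+1]

-- A's second loop: 'for num, cnt in n_check: if num != cnt: return False' then 'return True'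
def aCheckPairs : List (Int × Int) → Bool
  | [] => true
  | (num, cnt) :: rest => if num != cnt then false else aCheckPairs rest

def check_beautiful (number : List Int) : Bool :=
  aCheckPairs (aChunks 1 number)

-- ===== PORT B =====
-- Source B's for-loop over number[1:] with state (d, c); 'c % d' is only relevant when d > 0,
-- where Lean's Int.emod coincides with Python's %.
def bGo (d : Int) (c : Int) : List Int → Bool
  | [] => decide (0 < d) && (c % d == 0)
  | x :: rest =>
    if x == d then bGo d (c + 1) rest
    else if decide (d ≤ 0) || c % d != 0 then false
    else bGo x 1 rest

def check_beautiful_alt (number : List Int) : Bool :=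
  match number with
  | [] => true
  | x :: rest => bGo x 1 rest

-- ===== PRECONDITION & SPEC =====
def Spec_check_beautiful (number : List Int) (out : Bool) : Prop := out = check_beautiful_alt number
instance (number : List Int) (out : Bool) : Decidable (Spec_check_beautiful number out) := by unfold Spec_check_beautiful; infer_instance

-- ===== CLAIM (what is proved, stated in full; the proofs are below) =====
def Claim_equal_check_beautiful : Prop := ∀ (number : List Int), Dom_check_beautiful number → Spec_check_beautiful number (check_beautiful number)

-- ===== LEMMAS AND PROOFS =====

-- A's n_cnt when the current head is the c-th consecutive copy of digit d.
def pcnt (d c : Int) : Int := if 0 < d then (c - 1) % d + 1 else c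

theorem emod_succ (d r c : Int) (h : r = (c - 1) % d) : c % d = (r + 1) % d := by
  subst h
  rw [Int.emod_add_emod]
  ring_nf

-- 'd == n_cnt at the c-th copy' ↔ 'd > 0 and d divides c'
theorem emit_ok (d c : Int) (hc : 1 ≤ c) :
    (d == pcnt d c) = (decide (0 < d) && (c % d == 0)) := by
  by_cases hd : 0 < d
  · have h1 : 0 ≤ (c - 1) % d := Int.emod_nonneg _ (by omega)
    have h2 : (c - 1) % d < d := Int.emod_lt_of_pos _ hd
    have hm : c % d = ((c - 1) % d + 1) % d := emod_succ d _ c rfl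
    by_cases hr : (c - 1) % d = d - 1
    · have : c % d = 0 := by
        rw [hm, hr]; simp
      simp [pcnt, hd, hr, this]
    · have hlt : (c - 1) % d + 1 < d := by omega
      have : c % d = (c - 1) % d + 1 := by
        rw [hm]; exact Int.emod_eq_of_lt (by omega) hlt
      simp [pcnt, hd, this]
      omega
  · have hp : pcnt d c = c := by simp [pcnt, hd]
    simp [hp, hd]
    omega

theorem pcnt_one (d : Int) : pcnt d 1 = 1 := by
  unfold pcnt
  by_cases hd : 0 < d
  · simp [hd]
  · simp [hd]

theorem pcnt_step_emit {d c : Int} (hc : 1 ≤ c) (h : d = pcnt d c) : pcnt d (c + 1) = 1 := by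
  have hd : 0 < d := by
    by_contra hd
    have : pcnt d c = c := by simp [pcnt, hd]
    omega
  have h1 : 0 ≤ (c - 1) % d := Int.emod_nonneg _ (by omega)
  have hr : (c - 1) % d = d - 1 := by
    have : pcnt d c = (c - 1) % d + 1 := by simp [pcnt, hd]
    omega
  have hm : c % d = ((c - 1) % d + 1) % d := emod_succ d _ c rfl
  have hc0 : c % d = 0 := by rw [hm, hr]; simp
  unfold pcnt
  rw [if_pos hd]
  rw [show c + 1 - 1 = c by ring, hc0]
  norm_num
theorem pcnt_step_keep {d c : Int} (_hc : 1 ≤ c) (h : ¬ d = pcnt d c) :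
    pcnt d (c + 1) = pcnt d c + 1 := by
  by_cases hd : 0 < d
  · have h1 : 0 ≤ (c - 1) % d := Int.emod_nonneg _ (by omega)
    have h2 : (c - 1) % d < d := Int.emod_lt_of_pos _ hd
    have hp : pcnt d c = (c - 1) % d + 1 := by simp [pcnt, hd]
    have hr : (c - 1) % d < d - 1 := by omega
    have hm : c % d = ((c - 1) % d + 1) % d := emod_succ d _ c rfl
    have hc0 : c % d = (c - 1) % d + 1 :=
      hm.trans (Int.emod_eq_of_lt (by omega) (by omega))
    unfold pcnt
    rw [if_pos hd, if_pos hd]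
    rw [show c + 1 - 1 = c by ring, hc0]
  · simp [pcnt, hd]

-- Main invariant: A from state (n_cnt = pcnt d c, current run digit d, c copies consumed)
-- computes the same verdict as B's bGo.
theorem main_inv (rest : List Int) : ∀ d c : Int, 1 ≤ c →
    aCheckPairs (aChunks (pcnt d c) (d :: rest)) = bGo d c rest := by
  induction rest with
  | nil =>
    intro d c hc
    simp only [aChunks, aCheckPairs, bGo]
    rw [show (d != pcnt d c) = !(d == pcnt d c) by rfl, emit_ok d c hc]
    by_cases hd : 0 < d <;> by_cases hm : c % d = 0 <;> simp [hd, hm]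
  | cons y rest ih =>
    intro d c hc
    by_cases hy : d = y
    · subst hy
      by_cases he : d = pcnt d c
      · have he' : (d == pcnt d c) = true := beq_iff_eq.mpr he
        have h1 : pcnt d (c + 1) = 1 := pcnt_step_emit hc he
        have ht := ih d (c + 1) (by omega)
        rw [h1] at ht
        simp only [aChunks]
        rw [if_pos (by simp [he'])]
        simp only [aCheckPairs]
        rw [if_neg (by simp [bne, he'])]
        rw [ht]
        simp [bGo]
      · have he' : (d == pcnt d c) = false := by simp [he]
        have h1 : pcnt d (c + 1) = pcnt d c + 1 := pcnt_step_keep hc he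
        have ht := ih d (c + 1) (by omega)
        rw [h1] at ht
        simp only [aChunks]
        rw [if_neg (by simp [he'])]
        rw [ht]
        simp [bGo]
    · have hyne : (y == d) = false := by simp; exact fun h => hy h.symm
      have hcond : (d == pcnt d c || d != y) = true := by simp [hy]
      have he' := emit_ok d c hc
      have ht := ih y 1 le_rfl
      rw [pcnt_one] at ht
      simp only [aChunks]
      rw [if_pos hcond]
      simp only [aCheckPairs, bGo]
      have hbne : (d != pcnt d c) = !(decide (0 < d) && (c % d == 0)) := by
        rw [bne, he']
      rw [hbne, ht]
      by_cases h0 : 0 < d <;> by_cases hm : c % d = 0 <;>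
        simp [h0, hm, hyne]

-- ===== VERDICT (by name: the statement is the Claim_ definition above) =====
theorem check_beautiful_spec : Claim_equal_check_beautiful := by
  intro number _
  unfold Spec_check_beautiful check_beautiful check_beautiful_alt
  match number with
  | [] => rfl
  | x :: rest =>
    have := main_inv rest x 1 le_rfl
    rw [pcnt_one] at this
    exact this
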